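-- pv_equiv track=rewrite | github.com/rinnifox/pats-bio-python-course | task2/task2.py | make_shell
-- ===== SOURCE A (Python) =====
-- def make_shell(n):
--     shell = []
--     i = 1
--     j = n-1
--     for first in range(n):
--         shell.append([0]*i)
--         i += 1
--     for second in range(n, 2*n-1):
--         shell.append([0] * j)
--         j -= 1
--     return shell
-- ===== SOURCE B (Python) =====
-- def make_shell(n):
--     # Build only the top half, deriving each row from its predecessor by
--     # appending one zero (no length arithmetic), then mirror: the bottom half
--     # is fresh copies of the already-built rows in reverse order.
--     shell = []
--     row = []
--     for _ in range(n):
--         row = row + [0]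
--         shell.append(row)
--     return shell + [r[:] for r in reversed(shell[:-1])]
-- ===== Notes on version B (the rewrite author's own statement) =====
-- stated objective: alternative
-- what changed: Instead of two counter loops appending rows of arithmetically computed lengths, B never computes a row length: it derives each top-half row from its predecessor by appending one zero, and obtains the whole bottom half by mirroring (copying the already-built rows in reverse).
import Mathlib
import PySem

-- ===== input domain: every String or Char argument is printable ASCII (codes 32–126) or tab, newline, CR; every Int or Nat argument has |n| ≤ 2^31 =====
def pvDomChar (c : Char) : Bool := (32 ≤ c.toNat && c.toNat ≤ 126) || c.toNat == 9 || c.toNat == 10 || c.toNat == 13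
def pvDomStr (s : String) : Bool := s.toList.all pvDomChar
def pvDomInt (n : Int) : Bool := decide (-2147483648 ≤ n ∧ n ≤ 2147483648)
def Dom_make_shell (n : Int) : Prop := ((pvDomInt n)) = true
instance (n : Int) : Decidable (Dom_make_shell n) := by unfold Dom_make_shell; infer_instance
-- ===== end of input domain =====

-- B derives each top-half row from its predecessor (append one zero, no length
-- arithmetic) and mirrors the top half to get the bottom; objective: alternative.

-- ===== PORT A =====
def make_shell (n : Int) : List (List Int) :=
  -- shell = []; i = 1; j = n-1
  -- first loop: for first in range(n)
  let r1 := (PySem.List.pyRange 0 n 1).foldl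
      (fun (st : List (List Int) × Int) _ => (st.1 ++ [List.replicate st.2.toNat 0], st.2 + 1))
      ([], 1)
  -- second loop: for second in range(n, 2*n-1)
  let r2 := (PySem.List.pyRange n (2*n - 1) 1).foldl
      (fun (st : List (List Int) × Int) _ => (st.1 ++ [List.replicate st.2.toNat 0], st.2 - 1))
      (r1.1, n - 1)
  r2.1

-- ===== PORT B =====
-- 'r[:]' copies a row; on immutable Lean lists the copy is the row itself, so the
-- comprehension is the identity map over reversed(shell[:-1])
def make_shell_alt (n : Int) : List (List Int) :=
  let st := (PySem.List.pyRange 0 n 1).foldl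
      (fun (st : List (List Int) × List Int) _ =>
        let row := st.2 ++ [0]
        (st.1 ++ [row], row))
      ([], [])
  st.1 ++ ((PySem.List.slice st.1 none (some (-1))).reverse.map (fun r => r))

-- ===== PRECONDITION & SPEC =====
def Spec_make_shell (n : Int) (out : List (List Int)) : Prop := out = make_shell_alt n
instance (n : Int) (out : List (List Int)) : Decidable (Spec_make_shell n out) := by unfold Spec_make_shell; infer_instance

-- ===== CLAIM (what is proved, stated in full; the proofs are below) =====
def Claim_equal_make_shell : Prop := ∀ (n : Int), Dom_make_shell n → Spec_make_shell n (make_shell n)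

-- ===== LEMMAS AND PROOFS =====

-- the common closed form both ports are reduced to: row k has length n - |k - (n-1)|
def diamondCF (n : Int) : List (List Int) :=
  (List.range (2*n - 1).toNat).map (fun (k : Nat) => List.replicate (n - (((k : Int) - (n-1)).natAbs : Int)).toNat 0)

-- shifting a cons of replicates into one range-map (used by both A-loop lemmas)
theorem cons_shift_up (i : Int) (m : Nat) :
    List.replicate i.toNat (0:Int) :: (List.range m).map (fun (t:Nat) => List.replicate (i+1+(t:Int)).toNat 0)
    = (List.range (m+1)).map (fun (t:Nat) => List.replicate (i+(t:Int)).toNat 0) := by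
  rw [List.range_succ_eq_map, List.map_cons, List.map_map]
  refine List.cons_eq_cons.mpr ⟨by norm_num, ?_⟩
  apply List.map_congr_left
  intro t _
  simp only [Function.comp_apply]
  congr 1
  omega

theorem cons_shift_down (j : Int) (m : Nat) :
    List.replicate j.toNat (0:Int) :: (List.range m).map (fun (t:Nat) => List.replicate (j-1-(t:Int)).toNat 0)
    = (List.range (m+1)).map (fun (t:Nat) => List.replicate (j-(t:Int)).toNat 0) := by
  rw [List.range_succ_eq_map, List.map_cons, List.map_map]
  refine List.cons_eq_cons.mpr ⟨by norm_num, ?_⟩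
  apply List.map_congr_left
  intro t _
  simp only [Function.comp_apply]
  congr 1
  omega

-- A's first loop: appends rows of lengths i, i+1, … while counting up.
theorem fold_up (L : List Int) (acc : List (List Int)) (i : Int) :
    (L.foldl (fun (st : List (List Int) × Int) _ =>
        (st.1 ++ [List.replicate st.2.toNat 0], st.2 + 1)) (acc, i)) =
    (acc ++ (List.range L.length).map (fun (t : Nat) => List.replicate (i + (t:Int)).toNat 0), i + L.length) := by
  induction L generalizing acc i with
  | nil => simp
  | cons a L ih =>
    simp only [List.foldl_cons, ih]
    rw [Prod.mk.injEq]
    refine ⟨?_, by simp only [List.length_cons]; push_cast; ring⟩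
    rw [List.append_assoc, List.singleton_append, cons_shift_up i L.length, List.length_cons]

-- A's second loop: appends rows of lengths j, j-1, … while counting down.
theorem fold_down (L : List Int) (acc : List (List Int)) (j : Int) :
    (L.foldl (fun (st : List (List Int) × Int) _ =>
        (st.1 ++ [List.replicate st.2.toNat 0], st.2 - 1)) (acc, j)) =
    (acc ++ (List.range L.length).map (fun (t : Nat) => List.replicate (j - (t:Int)).toNat 0), j - L.length) := by
  induction L generalizing acc j with
  | nil => simp
  | cons a L ih =>
    simp only [List.foldl_cons, ih]
    rw [Prod.mk.injEq]
    refine ⟨?_, by simp only [List.length_cons]; push_cast; ring⟩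
    rw [List.append_assoc, List.singleton_append, cons_shift_down j L.length, List.length_cons]

-- A equals the closed form.
theorem a_eq_cf (n : Int) : make_shell n = diamondCF n := by
  unfold make_shell diamondCF
  simp only [fold_up, fold_down, List.nil_append,
    PySem.List.pyRange_one, List.length_map, List.length_range]
  apply List.ext_getElem
  · simp only [List.length_append, List.length_map, List.length_range]
    omega
  · intro k h1 h2
    simp only [List.length_append, List.length_map, List.length_range] at h1 h2
    by_cases hk : k < (n - 0).toNat
    · rw [List.getElem_append_left (by simpa using hk)]
      simp only [List.getElem_map, List.getElem_range]
      congr 1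
      omega
    · rw [List.getElem_append_right (by simpa using hk)]
      simp only [List.getElem_map, List.getElem_range]
      congr 1
      simp only [List.length_map, List.length_range]
      omega

-- shifting a cons into one range-map (B's top-half loop)
theorem cons_shift_top (r : List Int) (m : Nat) :
    (r ++ [0]) :: (List.range m).map (fun (t:Nat) => (r ++ [0]) ++ List.replicate (t+1) (0:Int))
    = (List.range (m+1)).map (fun (t:Nat) => r ++ List.replicate (t+1) (0:Int)) := by
  rw [List.range_succ_eq_map, List.map_cons, List.map_map]
  refine List.cons_eq_cons.mpr ⟨by simp, ?_⟩
  apply List.map_congr_left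
  intro t _
  simp [Function.comp_apply, List.append_assoc, List.replicate_succ]

-- B's loop: each appended row is the previous row plus one zero.
theorem fold_top {A : Type} (L : List A) (acc : List (List Int)) (r : List Int) :
    (L.foldl (fun (st : List (List Int) × List Int) _ =>
        (st.1 ++ [st.2 ++ [0]], st.2 ++ [0])) (acc, r))
    = (acc ++ (List.range L.length).map (fun (t:Nat) => r ++ List.replicate (t+1) (0:Int)),
       r ++ List.replicate L.length 0) := by
  induction L generalizing acc r with
  | nil => simp
  | cons a L ih =>
    simp only [List.foldl_cons, ih]
    rw [Prod.mk.injEq]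
    constructor
    · rw [List.append_assoc, List.singleton_append, cons_shift_top r L.length, List.length_cons]
    · simp [List.append_assoc, List.replicate_succ, List.length_cons]

-- B equals the closed form.
theorem b_eq_cf (n : Int) : make_shell_alt n = diamondCF n := by
  unfold make_shell_alt diamondCF
  simp only [fold_top, List.nil_append, PySem.List.pyRange_one, List.foldl_map,
    PySem.List.slice_to_neg_one, List.map_id']
  simp only [List.length_range]
  apply List.ext_getElem
  · simp only [List.length_append, List.length_map, List.length_range, List.length_reverse,
      List.length_dropLast]
    omega
  · intro k h1 h2
    simp only [List.length_append, List.length_map, List.length_range, List.length_reverse,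
      List.length_dropLast] at h1 h2
    by_cases hk : k < (n - 0).toNat
    · rw [List.getElem_append_left (by simpa using hk)]
      simp only [List.getElem_map, List.getElem_range]
      congr 1
      omega
    · rw [List.getElem_append_right (by simpa using hk)]
      rw [List.getElem_reverse, List.getElem_dropLast]
      simp only [List.getElem_map, List.getElem_range, List.length_map, List.length_range,
        List.length_dropLast]
      congr 1
      omega

-- ===== VERDICT (by name: the statement is the Claim_ definition above) =====
theorem make_shell_spec : Claim_equal_make_shell := by
  intro n _
  unfold Spec_make_shell
  rw [a_eq_cf, b_eq_cf]
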